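-- pv_equiv track=rewrite | github.com/memoization-over-Recursion/Algorithms-and-data-structures | hasSquareOfZeros/hasSquareOfZerosDynamIter.py | squareOfZeroes
-- ===== SOURCE A (Python) =====
-- def squareOfZeroes(matrix):
--     #spuare shape only 1s and 0s
--     #returns a boolean to tell if matrix has square of 0s
--     #0 0 0 0 0 min 2x2
--     #0       0
--     #0       0
--     #0       0
--     #0 0 0 0 0
--    matrixo = preComputeNum(matrix)
--    for row in range(len(matrixo)):
--         for col in range(len(matrixo[0])):
--             lenOfSquare = 2
--             while(lenOfSquare <= len(matrixo) - row and lenOfSquare <= len(matrixo) - col):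
--                 row2 = row + lenOfSquare - 1
--                 col2 = col + lenOfSquare - 1
--                 if(isSquareOfZeros(matrixo , col , row , col2 , row2)):
--                     return True
--                 lenOfSquare += 1
--    return False
--
-- def isSquareOfZeros(matrix , c1 , r1 , c2 , r2):
--     squareLength = c2-c1 + 1
--     belowTopLeft = matrix[r1][c1]["zeroBelow"] >= squareLength
--     rightTopLeft = matrix[r1][c1]["zeroRight"] >= squareLength
--     rightBottomLeft = matrix[r2][c1]["zeroRight"] >= squareLength
--     belowTopRight = matrix[r1][c2]["zeroBelow"] >= squareLength
--     return belowTopLeft and rightTopLeft and rightBottomLeft and belowTopRight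
--
-- def preComputeNum(matrix):
--     infoMatrix = [[x for x  in y] for y in matrix]
--     length = len(matrix)
--     for row in range(length):
--         for col in range(length):
--             numOfZeros =  1 if matrix[row][col] == 0 else 0
--             infoMatrix[row][col] = {
--                 "zeroBelow" : numOfZeros,
--                 "zeroRight" : numOfZeros,
--             }
--     id = len(matrix) - 1
--     for row in reversed(range(length)):
--         for col in reversed(range(length)):
--             if(matrix[row][col] == 1):
--                 continue
--             else:
--                 if(row < id):
--                     infoMatrix[row][col]["zeroBelow"] += infoMatrix[row+1][col]["zeroBelow"]
--                 if(col < id):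
--                     infoMatrix[row][col]["zeroRight"] += infoMatrix[row][col+1]["zeroRight"]
--     return infoMatrix
-- ===== SOURCE B (Python) =====
-- def squareOfZeroes(matrix):
--     # Prefix-count tables (zeros and ones, per column and per row) replace A's
--     # mutable per-cell dict table of run lengths; the end of each 1-free run is
--     # found by binary search on the monotone ones-prefix array, and the zeros
--     # in the run are a difference of two zero-prefix entries.
--     n = len(matrix)
--     colZ = [[0] * (n + 1) for _ in range(n)]  # colZ[c][t] = zeros in rows 0..t-1 of column c
--     colO = [[0] * (n + 1) for _ in range(n)]  # same for ones
--     rowZ = [[0] * (n + 1) for _ in range(n)]  # rowZ[r][t] = zeros in cols 0..t-1 of row r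
--     rowO = [[0] * (n + 1) for _ in range(n)]
--     for r in range(n):
--         for c in range(n):
--             v = matrix[r][c]
--             colZ[c][r + 1] = colZ[c][r] + (1 if v == 0 else 0)
--             colO[c][r + 1] = colO[c][r] + (1 if v == 1 else 0)
--             rowZ[r][c + 1] = rowZ[r][c] + (1 if v == 0 else 0)
--             rowO[r][c + 1] = rowO[r][c] + (1 if v == 1 else 0)
--
--     def last_le(pref, x):
--         # pref is nondecreasing with pref[0] = 0 <= x: binary search for the
--         # largest index t with pref[t] <= x
--         lo, hi = 0, len(pref) - 1
--         while lo < hi: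
--             mid = (lo + hi + 1) // 2
--             if pref[mid] <= x:
--                 lo = mid
--             else:
--                 hi = mid - 1
--         return lo
--
--     def arm_down(r, c):
--         # zeros in the 1-free run going down from (r, c): the run ends just
--         # before the first 1 at/after row r, i.e. at the last t with
--         # colO[c][t] == colO[c][r]
--         f = last_le(colO[c], colO[c][r])
--         return colZ[c][f] - colZ[c][r]
--
--     def arm_right(r, c):
--         f = last_le(rowO[r], rowO[r][c])
--         return rowZ[r][f] - rowZ[r][c]
--
--     for L in range(2, n + 1):
--         for r in range(n - L + 1):
--             for c in range(n - L + 1):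
--                 if (arm_down(r, c) >= L and arm_right(r, c) >= L
--                         and arm_right(r + L - 1, c) >= L
--                         and arm_down(r, c + L - 1) >= L):
--                     return True
--     return False
-- ===== Notes on version B (the rewrite author's own statement) =====
-- stated objective: alternative
-- what changed: Replaces A's mutable per-cell dict table of zero-run lengths (a two-pass DP rewriting the matrix in place) by four monotone prefix-count arrays (zeros and ones, per row and per column): each border arm is checked by binary-searching the ones-prefix array for the end of its 1-free run and taking a difference of two zero-prefix entries, and squares are scanned by size first instead of corner first.
import Mathlib
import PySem

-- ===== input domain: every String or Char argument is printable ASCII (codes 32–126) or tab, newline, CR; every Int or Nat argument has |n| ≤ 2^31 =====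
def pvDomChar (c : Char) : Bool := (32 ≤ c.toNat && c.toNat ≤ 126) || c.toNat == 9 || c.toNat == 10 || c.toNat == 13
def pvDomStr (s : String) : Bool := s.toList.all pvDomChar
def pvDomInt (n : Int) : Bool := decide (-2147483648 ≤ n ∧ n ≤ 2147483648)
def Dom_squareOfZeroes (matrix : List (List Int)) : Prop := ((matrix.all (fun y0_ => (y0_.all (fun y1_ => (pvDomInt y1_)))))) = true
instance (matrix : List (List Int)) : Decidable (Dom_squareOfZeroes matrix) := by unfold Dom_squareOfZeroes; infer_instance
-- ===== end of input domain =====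

-- B replaces A's mutable per-cell dict table of zero-run lengths by monotone
-- prefix-count arrays (zeros and ones, per row and per column) queried with a
-- binary search for the end of each 1-free run ("alternative": different data
-- structure and search mechanism, similar cost).

-- matrix[r][c]; within Pre_ every access either program performs is in range,
-- so the default 0 is never the value read
def pvIdx (m : List (List Int)) (r c : Nat) : Int := (m.getD r []).getD c 0

-- ===== PORT A =====
-- an info-matrix cell holds Python's {"zeroBelow": _, "zeroRight": _} as a pair
def pvInfoGet (i : List (List (Int × Int))) (r c : Nat) : Int × Int := (i.getD r []).getD c (0, 0)

-- in-place dict update infoMatrix[r][c][...] = _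
def pvInfoSet (i : List (List (Int × Int))) (r c : Nat) (p : Int × Int) : List (List (Int × Int)) :=
  i.set r ((i.getD r []).set c p)

-- first pass of preComputeNum: zero indicators per cell.  (Python first copies
-- each whole row and overwrites the first `length` entries; leftover raw ints
-- of over-long rows are never read afterwards, so the port keeps `length`
-- columns per row.)
def pvInitInfo (matrix : List (List Int)) : List (List (Int × Int)) :=
  (List.range matrix.length).map (fun row => (List.range matrix.length).map (fun col =>
    let numOfZeros : Int := if pvIdx matrix row col = 0 then 1 else 0
    (numOfZeros, numOfZeros)))

-- body of the inner (col) loop of the second, reversed pass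
def colStep (matrix : List (List Int)) (row : Nat) (infoMatrix : List (List (Int × Int))) (col : Nat) :
    List (List (Int × Int)) :=
  let id := matrix.length - 1
  if pvIdx matrix row col = 1 then infoMatrix
  else
    let infoMatrix :=
      if row < id then
        pvInfoSet infoMatrix row col
          ((pvInfoGet infoMatrix row col).1 + (pvInfoGet infoMatrix (row+1) col).1,
           (pvInfoGet infoMatrix row col).2)
      else infoMatrix
    if col < id then
      pvInfoSet infoMatrix row col
        ((pvInfoGet infoMatrix row col).1,
         (pvInfoGet infoMatrix row col).2 + (pvInfoGet infoMatrix row (col+1)).2)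
    else infoMatrix

-- body of the outer (row) loop: `for col in reversed(range(length))`
def rowStep (matrix : List (List Int)) (infoMatrix : List (List (Int × Int))) (row : Nat) :
    List (List (Int × Int)) :=
  ((List.range matrix.length).reverse).foldl (colStep matrix row) infoMatrix

def preComputeNum (matrix : List (List Int)) : List (List (Int × Int)) :=
  ((List.range matrix.length).reverse).foldl (rowStep matrix) (pvInitInfo matrix)

def isSquareOfZeros (matrix : List (List (Int × Int))) (c1 r1 c2 r2 : Nat) : Bool :=
  let squareLength : Int := (c2 : Int) - (c1 : Int) + 1
  decide ((pvInfoGet matrix r1 c1).1 ≥ squareLength) &&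
  (decide ((pvInfoGet matrix r1 c1).2 ≥ squareLength) &&
  (decide ((pvInfoGet matrix r2 c1).2 ≥ squareLength) &&
  decide ((pvInfoGet matrix r1 c2).1 ≥ squareLength)))

def squareOfZeroes (matrix : List (List Int)) : Bool :=
  let matrixo := preComputeNum matrix
  -- the early `return True` of the nested loops is List.any; the `while` over
  -- lenOfSquare = 2, 3, … is ported as the range of values it takes
  (List.range matrixo.length).any (fun row =>
    (List.range (matrixo.getD 0 []).length).any (fun col =>
      (List.range' 2 (min (matrixo.length - row) (matrixo.length - col) - 1)).any (fun lenOfSquare =>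
        isSquareOfZeros matrixo col row (col + lenOfSquare - 1) (row + lenOfSquare - 1))))

-- ===== PORT B =====
-- Source B's prefix-count rows colZ[c] / colO[c] / rowZ[r] / rowO[r], each the
-- function t ↦ table entry t (the fill loop's recurrence, entry by entry)
def colZpre (m : List (List Int)) (c : Nat) : Nat → Int
  | 0 => 0
  | t+1 => colZpre m c t + (if pvIdx m t c = 0 then 1 else 0)

def colOpre (m : List (List Int)) (c : Nat) : Nat → Int
  | 0 => 0
  | t+1 => colOpre m c t + (if pvIdx m t c = 1 then 1 else 0)

def rowZpre (m : List (List Int)) (r : Nat) : Nat → Int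
  | 0 => 0
  | t+1 => rowZpre m r t + (if pvIdx m r t = 0 then 1 else 0)

def rowOpre (m : List (List Int)) (r : Nat) : Nat → Int
  | 0 => 0
  | t+1 => rowOpre m r t + (if pvIdx m r t = 1 then 1 else 0)

-- Source B's last_le: binary search for the largest index t ∈ [lo, hi] with
-- pref t ≤ x.  The while loop runs at most hi - lo times (each step shrinks
-- the interval), so it is transcribed with that iteration budget as a
-- structural counter; the loop guard lo < hi stays inside.
def lastLeGo (pref : Nat → Int) (x : Int) : Nat → Nat → Nat → Nat
  | 0, lo, _ => lo
  | fuel+1, lo, hi =>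
    if lo < hi then
      if pref ((lo + hi + 1) / 2) ≤ x then lastLeGo pref x fuel ((lo + hi + 1) / 2) hi
      else lastLeGo pref x fuel lo ((lo + hi + 1) / 2 - 1)
    else lo

def lastLe (pref : Nat → Int) (x : Int) (lo hi : Nat) : Nat := lastLeGo pref x (hi - lo) lo hi

-- Source B's arm_down / arm_right (the prefix arrays have indices 0..n)
def armDown (m : List (List Int)) (r c : Nat) : Int :=
  colZpre m c (lastLe (colOpre m c) (colOpre m c r) 0 m.length) - colZpre m c r

def armRight (m : List (List Int)) (r c : Nat) : Int :=
  rowZpre m r (lastLe (rowOpre m r) (rowOpre m r c) 0 m.length) - rowZpre m r c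

-- the four-arm test of Source B's innermost `if`
def pvArmOk (m : List (List Int)) (L r c : Nat) : Bool :=
  decide (armDown m r c ≥ (L : Int)) &&
  (decide (armRight m r c ≥ (L : Int)) &&
  (decide (armRight m (r + L - 1) c ≥ (L : Int)) &&
  decide (armDown m r (c + L - 1) ≥ (L : Int))))

def squareOfZeroes_alt (matrix : List (List Int)) : Bool :=
  let n := matrix.length
  (List.range' 2 (n - 1)).any (fun L =>          -- L in range(2, n+1)
    (List.range (n - L + 1)).any (fun r =>
      (List.range (n - L + 1)).any (fun c =>
        pvArmOk matrix L r c)))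

-- ===== PRECONDITION & SPEC =====
-- Pre_ excludes exactly the matrices having a row shorter than len(matrix), on
-- which Python A raises IndexError in preComputeNum (B raises there too).
def Pre_squareOfZeroes (matrix : List (List Int)) : Prop :=
  ∀ row ∈ matrix, matrix.length ≤ row.length
instance (matrix : List (List Int)) : Decidable (Pre_squareOfZeroes matrix) := by
  unfold Pre_squareOfZeroes; infer_instance

def pvWitness_squareOfZeroes : List (List Int) := [[1, 0, 0], [1, 0, 0], [1, 1, 1]]

def Spec_squareOfZeroes (matrix : List (List Int)) (out : Bool) : Prop := out = squareOfZeroes_alt matrix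
instance (matrix : List (List Int)) (out : Bool) : Decidable (Spec_squareOfZeroes matrix out) := by unfold Spec_squareOfZeroes; infer_instance

-- ===== CLAIM (what is proved, stated in full; the proofs are below) =====
def Claim_equal_squareOfZeroes : Prop := ∀ (matrix : List (List Int)), Dom_squareOfZeroes matrix → Pre_squareOfZeroes matrix → Spec_squareOfZeroes matrix (squareOfZeroes matrix)

-- ===== LEMMAS AND PROOFS =====

-- proof-side specifications: the consecutive-zero run counts A's table holds
def sufColZ (matrix : List (List Int)) (c r : Nat) : Int :=
  if r < matrix.length then
    (if pvIdx matrix r c = 0 then 1 else 0) + sufColZ matrix c (r+1)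
  else 0
termination_by matrix.length - r

def nextColOne (matrix : List (List Int)) (c r : Nat) : Nat :=
  if r < matrix.length then
    (if pvIdx matrix r c = 1 then r else nextColOne matrix c (r+1))
  else matrix.length
termination_by matrix.length - r

def sufRowZ (matrix : List (List Int)) (r c : Nat) : Int :=
  if c < matrix.length then
    (if pvIdx matrix r c = 0 then 1 else 0) + sufRowZ matrix r (c+1)
  else 0
termination_by matrix.length - c

def nextRowOne (matrix : List (List Int)) (r c : Nat) : Nat :=
  if c < matrix.length then
    (if pvIdx matrix r c = 1 then c else nextRowOne matrix r (c+1))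
  else matrix.length
termination_by matrix.length - c

def zbAlt (matrix : List (List Int)) (r c : Nat) : Int :=
  sufColZ matrix c r - sufColZ matrix c (nextColOne matrix c r)

def zrAlt (matrix : List (List Int)) (r c : Nat) : Int :=
  sufRowZ matrix r c - sufRowZ matrix r (nextRowOne matrix r c)

def pvCond (matrix : List (List Int)) (L r c : Nat) : Bool :=
  decide (zbAlt matrix r c ≥ (L : Int)) &&
  (decide (zrAlt matrix r c ≥ (L : Int)) &&
  (decide (zrAlt matrix (r + L - 1) c ≥ (L : Int)) &&
  decide (zbAlt matrix r (c + L - 1) ≥ (L : Int))))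

-- the run-count form of the whole search (midpoint of the proof)
def anyOld (m : List (List Int)) : Bool :=
  (List.range' 2 (m.length - 1)).any (fun L =>
    (List.range (m.length - L + 1)).any (fun r =>
      (List.range (m.length - L + 1)).any (fun c =>
        pvCond m L r c)))

-- initial and final values of an info-matrix cell
def pvIni (m : List (List Int)) (r c : Nat) : Int × Int :=
  (if pvIdx m r c = 0 then 1 else 0, if pvIdx m r c = 0 then 1 else 0)

def pvFin (m : List (List Int)) (r c : Nat) : Int × Int := (zbAlt m r c, zrAlt m r c)

-- loop invariant of the reversed DP pass: cells strictly after (R, C) in the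
-- processing order hold their final value, the others their initial value
def GoodRC (m : List (List Int)) (R C : Nat) (s : List (List (Int × Int))) : Prop :=
  s.length = m.length ∧ (∀ i < m.length, (s.getD i []).length = m.length) ∧
  ∀ r c, r < m.length → c < m.length →
    pvInfoGet s r c = if R < r ∨ (R = r ∧ C ≤ c) then pvFin m r c else pvIni m r c

theorem pvIni_fst (m : List (List Int)) (r c : Nat) :
    (pvIni m r c).1 = if pvIdx m r c = 0 then 1 else 0 := rfl

theorem pvIni_snd (m : List (List Int)) (r c : Nat) :
    (pvIni m r c).2 = if pvIdx m r c = 0 then 1 else 0 := rfl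

theorem pvFin_fst (m : List (List Int)) (r c : Nat) : (pvFin m r c).1 = zbAlt m r c := rfl

theorem pvFin_snd (m : List (List Int)) (r c : Nat) : (pvFin m r c).2 = zrAlt m r c := rfl

theorem getD_set' {α : Type} (l : List α) (i j : Nat) (a d : α) :
    (l.set i a).getD j d = if i = j ∧ j < l.length then a else l.getD j d := by
  simp only [List.getD_eq_getElem?_getD, List.getElem?_set]
  split_ifs with h1 h2 h3 h3 <;> simp_all

theorem pvInfoSet_length (s : List (List (Int × Int))) (r c : Nat) (p : Int × Int) :
    (pvInfoSet s r c p).length = s.length := by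
  unfold pvInfoSet; exact List.length_set ..

theorem pvInfoSet_rowlen (s : List (List (Int × Int))) (r c : Nat) (p : Int × Int) (i : Nat) :
    ((pvInfoSet s r c p).getD i []).length = (s.getD i []).length := by
  unfold pvInfoSet
  rw [getD_set']
  split_ifs with h
  · rw [List.length_set, h.1]
  · rfl

theorem pvInfoGet_pvInfoSet (s : List (List (Int × Int))) (r c : Nat) (p : Int × Int)
    (r' c' : Nat) (hr : r < s.length) (hc : c < (s.getD r []).length) :
    pvInfoGet (pvInfoSet s r c p) r' c' = if r = r' ∧ c = c' then p else pvInfoGet s r' c' := by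
  unfold pvInfoGet pvInfoSet
  rw [getD_set']
  by_cases hrr : r = r'
  · subst hrr
    rw [if_pos ⟨rfl, hr⟩, getD_set']
    by_cases hcc : c = c'
    · subst hcc; rw [if_pos ⟨rfl, hc⟩, if_pos ⟨rfl, rfl⟩]
    · rw [if_neg (by tauto), if_neg (by tauto)]
  · rw [if_neg (by tauto), if_neg (by tauto)]

-- recurrences of the run-zero counts
theorem sufColZ_stop (m : List (List Int)) (c r : Nat) (h : m.length ≤ r) : sufColZ m c r = 0 := by
  rw [sufColZ.eq_def, if_neg (by omega)]

theorem sufRowZ_stop (m : List (List Int)) (r c : Nat) (h : m.length ≤ c) : sufRowZ m r c = 0 := by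
  rw [sufRowZ.eq_def, if_neg (by omega)]

theorem zbAlt_out (m : List (List Int)) (r c : Nat) (h : m.length ≤ r) : zbAlt m r c = 0 := by
  unfold zbAlt
  rw [nextColOne.eq_def, if_neg (by omega), sufColZ_stop m c r h, sufColZ_stop m c m.length (le_refl _), sub_self]

theorem zrAlt_out (m : List (List Int)) (r c : Nat) (h : m.length ≤ c) : zrAlt m r c = 0 := by
  unfold zrAlt
  rw [nextRowOne.eq_def, if_neg (by omega), sufRowZ_stop m r c h, sufRowZ_stop m r m.length (le_refl _), sub_self]

theorem zbAlt_one (m : List (List Int)) (r c : Nat) (hr : r < m.length) (h1 : pvIdx m r c = 1) :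
    zbAlt m r c = 0 := by
  unfold zbAlt
  rw [nextColOne.eq_def, if_pos hr, if_pos h1, sub_self]

theorem zrAlt_one (m : List (List Int)) (r c : Nat) (hc : c < m.length) (h1 : pvIdx m r c = 1) :
    zrAlt m r c = 0 := by
  unfold zrAlt
  rw [nextRowOne.eq_def, if_pos hc, if_pos h1, sub_self]

theorem zbAlt_rec (m : List (List Int)) (r c : Nat) (hr : r < m.length) (h1 : pvIdx m r c ≠ 1) :
    zbAlt m r c = (if pvIdx m r c = 0 then 1 else 0) + zbAlt m (r+1) c := by
  unfold zbAlt
  rw [nextColOne.eq_def, if_pos hr, if_neg h1]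
  conv_lhs => rw [sufColZ.eq_def, if_pos hr]
  ring

theorem zrAlt_rec (m : List (List Int)) (r c : Nat) (hc : c < m.length) (h1 : pvIdx m r c ≠ 1) :
    zrAlt m r c = (if pvIdx m r c = 0 then 1 else 0) + zrAlt m r (c+1) := by
  unfold zrAlt
  rw [nextRowOne.eq_def, if_pos hc, if_neg h1]
  conv_lhs => rw [sufRowZ.eq_def, if_pos hc]
  ring

-- fin = ini at a 1-cell
theorem pvFin_one (m : List (List Int)) (r c : Nat) (hr : r < m.length) (hc : c < m.length)
    (h1 : pvIdx m r c = 1) : pvFin m r c = pvIni m r c := by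
  unfold pvFin pvIni
  rw [zbAlt_one m r c hr h1, zrAlt_one m r c hc h1, h1]
  norm_num

-- the inner-loop body establishes the invariant for the next cell
theorem colStep_good (m : List (List Int)) (R C : Nat) (s : List (List (Int × Int)))
    (hR : R < m.length) (hC : C < m.length) (h : GoodRC m R (C+1) s) :
    GoodRC m R C (colStep m R s C) := by
  obtain ⟨hlen, hrows, hval⟩ := h
  have hsR : R < s.length := by omega
  have hsRC : C < (s.getD R []).length := by rw [hrows R hR]; exact hC
  unfold colStep
  by_cases hone : pvIdx m R C = 1
  · rw [if_pos hone]
    refine ⟨hlen, hrows, ?_⟩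
    intro r c hr hc
    rw [hval r c hr hc]
    by_cases heq : R = r ∧ C = c
    · obtain ⟨h1, h2⟩ := heq; subst h1; subst h2
      rw [if_neg (by omega), if_pos (by omega), pvFin_one m R C hR hC hone]
    · exact if_congr (by omega) rfl rfl
  · rw [if_neg hone]
    simp only []
    set id := m.length - 1 with hid
    set s1 := (if R < id then
        pvInfoSet s R C
          ((pvInfoGet s R C).1 + (pvInfoGet s (R+1) C).1, (pvInfoGet s R C).2)
      else s) with hs1
    have hvalRC : pvInfoGet s R C = pvIni m R C := by
      rw [hval R C hR hC, if_neg (by omega)]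
    have hs1len : s1.length = s.length := by
      rw [hs1]; split_ifs with h
      · exact pvInfoSet_length ..
      · rfl
    have hs1rows : ∀ i, ((s1.getD i []).length) = (s.getD i []).length := by
      intro i; rw [hs1]; split_ifs with h
      · exact pvInfoSet_rowlen ..
      · rfl
    have hs1get : ∀ r c, ¬(R = r ∧ C = c) → pvInfoGet s1 r c = pvInfoGet s r c := by
      intro r c hne
      rw [hs1]; split_ifs with h
      · rw [pvInfoGet_pvInfoSet s R C _ r c hsR hsRC, if_neg hne]
      · rfl
    have hs1RC : pvInfoGet s1 R C =
        ((pvIni m R C).1 + (if R < id then zbAlt m (R+1) C else 0), (pvIni m R C).2) := by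
      rw [hs1]; split_ifs with h
      · rw [pvInfoGet_pvInfoSet s R C _ R C hsR hsRC, if_pos ⟨rfl, rfl⟩, hvalRC]
        have hb : pvInfoGet s (R+1) C = pvFin m (R+1) C := by
          rw [hval (R+1) C (by omega) hC, if_pos (by omega)]
        rw [hb, pvFin_fst]
      · rw [hvalRC, add_zero]
    have hX : (pvIni m R C).1 + (if R < id then zbAlt m (R+1) C else 0) = zbAlt m R C := by
      rw [zbAlt_rec m R C hR hone, pvIni_fst]
      by_cases h : R < id
      · rw [if_pos h]
      · rw [if_neg h, zbAlt_out m (R+1) C (by omega), add_zero]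
    have hs1R : R < s1.length := by rw [hs1len, hlen]; exact hR
    have hs1C : C < (s1.getD R []).length := by rw [hs1rows R]; exact hsRC
    refine ⟨?_, ?_, ?_⟩
    · split_ifs with h
      · rw [pvInfoSet_length, hs1len, hlen]
      · rw [hs1len, hlen]
    · intro i hi
      split_ifs with h
      · rw [pvInfoSet_rowlen, hs1rows i]; exact hrows i hi
      · rw [hs1rows i]; exact hrows i hi
    · intro r c hr hc
      by_cases heq : R = r ∧ C = c
      · obtain ⟨h1, h2⟩ := heq; subst h1; subst h2
        have hcond : (if R < R ∨ R = R ∧ C ≤ C then pvFin m R C else pvIni m R C) = pvFin m R C :=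
          if_pos (by omega)
        rw [hcond]
        by_cases h : C < id
        · rw [if_pos h, pvInfoGet_pvInfoSet s1 R C _ R C hs1R hs1C, if_pos ⟨rfl, rfl⟩]
          have hr2 : pvInfoGet s1 R (C+1) = pvFin m R (C+1) := by
            rw [hs1get R (C+1) (by omega), hval R (C+1) hR (by omega), if_pos (by omega)]
          rw [hs1RC, hr2]
          have hY : (pvIni m R C).2 + (pvFin m R (C+1)).2 = zrAlt m R C := by
            rw [pvFin_snd, pvIni_snd, zrAlt_rec m R C hC hone]
          refine Prod.ext ?_ ?_
          · simpa [pvFin_fst] using hX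
          · simpa [pvFin_snd] using hY
        · rw [if_neg h, hs1RC]
          have hY : (pvIni m R C).2 = zrAlt m R C := by
            rw [pvIni_snd, zrAlt_rec m R C hC hone, zrAlt_out m R (C+1) (by omega), add_zero]
          refine Prod.ext ?_ ?_
          · simpa [pvFin_fst] using hX
          · simpa [pvFin_snd] using hY
      · have hchain : pvInfoGet (if C < id then
            pvInfoSet s1 R C
              ((pvInfoGet s1 R C).1, (pvInfoGet s1 R C).2 + (pvInfoGet s1 R (C+1)).2)
          else s1) r c = pvInfoGet s r c := by
          split_ifs with h
          · rw [pvInfoGet_pvInfoSet s1 R C _ r c hs1R hs1C, if_neg heq, hs1get r c heq]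
          · exact hs1get r c heq
        rw [hchain, hval r c hr hc]
        exact if_congr (by omega) rfl rfl

theorem cols_fold (m : List (List Int)) (R : Nat) (hR : R < m.length) :
    ∀ (k : Nat) (s : List (List (Int × Int))), k ≤ m.length → GoodRC m R k s →
      GoodRC m R 0 (((List.range k).reverse).foldl (colStep m R) s) := by
  intro k
  induction k with
  | zero => intro s _ h; simpa using h
  | succ k ih =>
    intro s hk h
    rw [List.range_succ, List.reverse_append]
    simp only [List.reverse_cons, List.reverse_nil, List.nil_append]
    exact ih _ (by omega) (colStep_good m R k s hR (by omega) h)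

theorem goodRC_shift (m : List (List Int)) (R : Nat) (s : List (List (Int × Int)))
    (h : GoodRC m (R+1) 0 s) : GoodRC m R m.length s := by
  obtain ⟨h1, h2, h3⟩ := h
  refine ⟨h1, h2, ?_⟩
  intro r c hr hc
  rw [h3 r c hr hc]
  exact if_congr (by omega) rfl rfl

theorem rowStep_good (m : List (List Int)) (R : Nat) (s : List (List (Int × Int)))
    (hR : R < m.length) (h : GoodRC m (R+1) 0 s) : GoodRC m R 0 (rowStep m s R) := by
  unfold rowStep
  exact cols_fold m R hR m.length s (le_refl _) (goodRC_shift m R s h)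

theorem rows_fold (m : List (List Int)) :
    ∀ (k : Nat) (s : List (List (Int × Int))), k ≤ m.length → GoodRC m k 0 s →
      GoodRC m 0 0 (((List.range k).reverse).foldl (rowStep m) s) := by
  intro k
  induction k with
  | zero => intro s _ h; simpa using h
  | succ k ih =>
    intro s hk h
    rw [List.range_succ, List.reverse_append]
    simp only [List.reverse_cons, List.reverse_nil, List.nil_append]
    refine ih _ (by omega) (rowStep_good m k s (by omega) ?_)
    exact h

theorem getD_map_range' {α : Type} (f : Nat → α) (n i : Nat) (d : α) (hi : i < n) :
    ((List.range n).map f).getD i d = f i := by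
  rw [List.getD_eq_getElem?_getD, List.getElem?_map, List.getElem?_range hi]
  rfl

theorem init_good (m : List (List Int)) : GoodRC m m.length 0 (pvInitInfo m) := by
  unfold pvInitInfo GoodRC
  refine ⟨by simp, ?_, ?_⟩
  · intro i hi
    rw [getD_map_range' _ _ _ _ hi]
    simp
  · intro r c hr hc
    rw [if_neg (by omega)]
    unfold pvInfoGet
    rw [getD_map_range' _ _ _ _ hr, getD_map_range' _ _ _ _ hc]
    rfl

theorem preComputeNum_good (m : List (List Int)) : GoodRC m 0 0 (preComputeNum m) := by
  unfold preComputeNum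
  exact rows_fold m m.length (pvInitInfo m) (le_refl _) (init_good m)

theorem preComputeNum_length (m : List (List Int)) : (preComputeNum m).length = m.length :=
  (preComputeNum_good m).1

theorem colBound_eq (m : List (List Int)) : ((preComputeNum m).getD 0 []).length = m.length := by
  obtain ⟨h1, h2, _⟩ := preComputeNum_good m
  rcases Nat.eq_zero_or_pos m.length with h | h
  · have : preComputeNum m = [] := List.eq_nil_of_length_eq_zero (by omega)
    rw [this, h]; rfl
  · exact h2 0 h

theorem infoGet_fin (m : List (List Int)) (r c : Nat) (hr : r < m.length) (hc : c < m.length) :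
    pvInfoGet (preComputeNum m) r c = pvFin m r c := by
  have h := (preComputeNum_good m).2.2 r c hr hc
  rwa [if_pos (by omega)] at h

theorem isSq_eq (m : List (List Int)) (row col L : Nat) (hL2 : 2 ≤ L)
    (h1 : row + L ≤ m.length) (h2 : col + L ≤ m.length) :
    isSquareOfZeros (preComputeNum m) col row (col + L - 1) (row + L - 1) = pvCond m L row col := by
  have e1 : pvInfoGet (preComputeNum m) row col = pvFin m row col :=
    infoGet_fin m row col (by omega) (by omega)
  have e2 : pvInfoGet (preComputeNum m) (row + L - 1) col = pvFin m (row + L - 1) col :=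
    infoGet_fin m (row + L - 1) col (by omega) (by omega)
  have e3 : pvInfoGet (preComputeNum m) row (col + L - 1) = pvFin m row (col + L - 1) :=
    infoGet_fin m row (col + L - 1) (by omega) (by omega)
  have e4 : ((col + L - 1 : Nat) : Int) - (col : Int) + 1 = (L : Int) := by omega
  simp only [isSquareOfZeros, pvCond, e1, e2, e3, e4, pvFin]

-- A's search equals the run-count form of the search
theorem main_eq (m : List (List Int)) : squareOfZeroes m = anyOld m := by
  rw [Bool.eq_iff_iff]
  simp only [squareOfZeroes, anyOld, preComputeNum_length, colBound_eq,
    List.any_eq_true, List.mem_range, List.mem_range'_1]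
  constructor
  · rintro ⟨row, hrow, col, hcol, L, ⟨hL2, hLlt⟩, hc⟩
    have h1 : row + L ≤ m.length := by omega
    have h2 : col + L ≤ m.length := by omega
    rw [isSq_eq m row col L hL2 h1 h2] at hc
    exact ⟨L, ⟨hL2, by omega⟩, row, by omega, col, by omega, hc⟩
  · rintro ⟨L, ⟨hL2, hLn⟩, r, hr, c, hcn, hc⟩
    have h1 : r + L ≤ m.length := by omega
    have h2 : c + L ≤ m.length := by omega
    refine ⟨r, by omega, c, by omega, L, ⟨hL2, by omega⟩, ?_⟩
    rw [isSq_eq m r c L hL2 h1 h2]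
    exact hc

-- ===== B-side lemmas: the binary-searched prefix differences are the run counts =====

theorem colOpre_succ (m : List (List Int)) (c t : Nat) :
    colOpre m c (t+1) = colOpre m c t + (if pvIdx m t c = 1 then 1 else 0) := rfl

theorem colZpre_succ (m : List (List Int)) (c t : Nat) :
    colZpre m c (t+1) = colZpre m c t + (if pvIdx m t c = 0 then 1 else 0) := rfl

theorem rowOpre_succ (m : List (List Int)) (r t : Nat) :
    rowOpre m r (t+1) = rowOpre m r t + (if pvIdx m r t = 1 then 1 else 0) := rfl

theorem rowZpre_succ (m : List (List Int)) (r t : Nat) :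
    rowZpre m r (t+1) = rowZpre m r t + (if pvIdx m r t = 0 then 1 else 0) := rfl

theorem colOpre_mono (m : List (List Int)) (c : Nat) (a b : Nat) (h : a ≤ b) :
    colOpre m c a ≤ colOpre m c b := by
  induction b with
  | zero =>
    have : a = 0 := by omega
    subst this; exact le_rfl
  | succ b ih =>
    by_cases hab : a = b + 1
    · subst hab; exact le_rfl
    · have h1 := ih (by omega)
      rw [colOpre_succ]
      split_ifs <;> linarith

theorem rowOpre_mono (m : List (List Int)) (r : Nat) (a b : Nat) (h : a ≤ b) :
    rowOpre m r a ≤ rowOpre m r b := by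
  induction b with
  | zero =>
    have : a = 0 := by omega
    subst this; exact le_rfl
  | succ b ih =>
    by_cases hab : a = b + 1
    · subst hab; exact le_rfl
    · have h1 := ih (by omega)
      rw [rowOpre_succ]
      split_ifs <;> linarith

-- what the binary search returns: the last index t ∈ [lo, hi] with pref t ≤ x
theorem lastLeGo_spec (pref : Nat → Int) (x : Int) :
    ∀ n lo hi, hi - lo ≤ n → lo ≤ hi → pref lo ≤ x →
      lo ≤ lastLeGo pref x n lo hi ∧ lastLeGo pref x n lo hi ≤ hi ∧
      pref (lastLeGo pref x n lo hi) ≤ x ∧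
      (lastLeGo pref x n lo hi < hi → x < pref (lastLeGo pref x n lo hi + 1)) := by
  intro n
  induction n with
  | zero =>
    intro lo hi hfuel hle hx
    have hh : hi = lo := by omega
    subst hh
    simp only [lastLeGo]
    exact ⟨le_rfl, le_rfl, hx, by omega⟩
  | succ n ih =>
    intro lo hi hfuel hle hx
    rw [lastLeGo]
    by_cases hlt : lo < hi
    · rw [if_pos hlt]
      have hm1 : lo < (lo + hi + 1) / 2 := by omega
      have hm2 : (lo + hi + 1) / 2 ≤ hi := by omega
      by_cases hp : pref ((lo + hi + 1) / 2) ≤ x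
      · rw [if_pos hp]
        obtain ⟨a, b, c, d⟩ := ih ((lo + hi + 1) / 2) hi (by omega) (by omega) hp
        exact ⟨by omega, b, c, d⟩
      · rw [if_neg hp]
        obtain ⟨a, b, c, d⟩ := ih lo ((lo + hi + 1) / 2 - 1) (by omega) (by omega) hx
        refine ⟨a, by omega, c, ?_⟩
        intro _
        by_cases he : lastLeGo pref x n lo ((lo + hi + 1) / 2 - 1) < (lo + hi + 1) / 2 - 1
        · exact d he
        · have he2 : lastLeGo pref x n lo ((lo + hi + 1) / 2 - 1) + 1 = (lo + hi + 1) / 2 := by omega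
          rw [he2]
          linarith [not_le.mp hp]
    · rw [if_neg hlt]
      exact ⟨le_rfl, by omega, hx, by omega⟩

theorem lastLe_spec (pref : Nat → Int) (x : Int) (lo hi : Nat) (hle : lo ≤ hi)
    (hx : pref lo ≤ x) :
    lo ≤ lastLe pref x lo hi ∧ lastLe pref x lo hi ≤ hi ∧
    pref (lastLe pref x lo hi) ≤ x ∧
    (lastLe pref x lo hi < hi → x < pref (lastLe pref x lo hi + 1)) :=
  lastLeGo_spec pref x (hi - lo) lo hi le_rfl hle hx

-- uniqueness for a monotone prefix: a candidate with the same two-sided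
-- characterisation is the search result
theorem lastLe_eq_of (pref : Nat → Int) (x : Int) (hi f : Nat)
    (mono : ∀ a b : Nat, a ≤ b → pref a ≤ pref b)
    (h1 : f ≤ hi) (h2 : pref f ≤ x) (h3 : f < hi → x < pref (f+1)) :
    lastLe pref x 0 hi = f := by
  have h0 : pref 0 ≤ x := le_trans (mono 0 f (by omega)) h2
  obtain ⟨_, hb, hc, hd⟩ := lastLe_spec pref x 0 hi (by omega) h0
  by_contra hne
  rcases Nat.lt_or_ge (lastLe pref x 0 hi) f with hlt | hge
  · have hs := hd (by omega)
    have hmm := mono (lastLe pref x 0 hi + 1) f (by omega)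
    linarith
  · have hgt : f < lastLe pref x 0 hi := by omega
    have hs := h3 (by omega)
    have hmm := mono (f+1) (lastLe pref x 0 hi) (by omega)
    linarith

-- the first-1 index of a column run, characterised through the ones prefix
theorem nextColOne_spec (m : List (List Int)) (c : Nat) :
    ∀ k r, m.length - r ≤ k → r ≤ m.length →
      r ≤ nextColOne m c r ∧ nextColOne m c r ≤ m.length ∧
      colOpre m c (nextColOne m c r) = colOpre m c r ∧
      (nextColOne m c r < m.length → pvIdx m (nextColOne m c r) c = 1) := by
  intro k
  induction k with
  | zero =>
    intro r h1 h2
    have hr : r = m.length := by omega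
    rw [nextColOne.eq_def, if_neg (by omega)]
    exact ⟨by omega, le_rfl, by rw [hr], by omega⟩
  | succ k ih =>
    intro r h1 h2
    rw [nextColOne.eq_def]
    by_cases hlt : r < m.length
    · rw [if_pos hlt]
      by_cases hone : pvIdx m r c = 1
      · rw [if_pos hone]
        exact ⟨le_rfl, by omega, rfl, fun _ => hone⟩
      · rw [if_neg hone]
        obtain ⟨a, b, cc, d⟩ := ih (r+1) (by omega) (by omega)
        refine ⟨by omega, b, ?_, d⟩
        rw [cc, colOpre_succ, if_neg hone, add_zero]
    · rw [if_neg hlt]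
      have hr : r = m.length := by omega
      exact ⟨by omega, le_rfl, by rw [hr], by omega⟩

theorem nextRowOne_spec (m : List (List Int)) (r : Nat) :
    ∀ k c, m.length - c ≤ k → c ≤ m.length →
      c ≤ nextRowOne m r c ∧ nextRowOne m r c ≤ m.length ∧
      rowOpre m r (nextRowOne m r c) = rowOpre m r c ∧
      (nextRowOne m r c < m.length → pvIdx m r (nextRowOne m r c) = 1) := by
  intro k
  induction k with
  | zero =>
    intro c h1 h2
    have hc : c = m.length := by omega
    rw [nextRowOne.eq_def, if_neg (by omega)]
    exact ⟨by omega, le_rfl, by rw [hc], by omega⟩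
  | succ k ih =>
    intro c h1 h2
    rw [nextRowOne.eq_def]
    by_cases hlt : c < m.length
    · rw [if_pos hlt]
      by_cases hone : pvIdx m r c = 1
      · rw [if_pos hone]
        exact ⟨le_rfl, by omega, rfl, fun _ => hone⟩
      · rw [if_neg hone]
        obtain ⟨a, b, cc, d⟩ := ih (c+1) (by omega) (by omega)
        refine ⟨by omega, b, ?_, d⟩
        rw [cc, rowOpre_succ, if_neg hone, add_zero]
    · rw [if_neg hlt]
      have hc : c = m.length := by omega
      exact ⟨by omega, le_rfl, by rw [hc], by omega⟩

theorem lastLe_eq_nextCol (m : List (List Int)) (c r : Nat) (hr : r ≤ m.length) :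
    lastLe (colOpre m c) (colOpre m c r) 0 m.length = nextColOne m c r := by
  obtain ⟨a, b, cc, d⟩ := nextColOne_spec m c (m.length - r) r (by omega) hr
  refine lastLe_eq_of _ _ _ _ (colOpre_mono m c) b (le_of_eq cc) ?_
  intro hlt
  rw [colOpre_succ, d hlt, if_pos rfl]
  linarith [le_of_eq cc]

theorem lastLe_eq_nextRow (m : List (List Int)) (r c : Nat) (hc : c ≤ m.length) :
    lastLe (rowOpre m r) (rowOpre m r c) 0 m.length = nextRowOne m r c := by
  obtain ⟨a, b, cc, d⟩ := nextRowOne_spec m r (m.length - c) c (by omega) hc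
  refine lastLe_eq_of _ _ _ _ (rowOpre_mono m r) b (le_of_eq cc) ?_
  intro hlt
  rw [rowOpre_succ, d hlt, if_pos rfl]
  linarith [le_of_eq cc]

-- zero-prefix and zero-suffix counts telescope to the column/row total
theorem colZ_telescope (m : List (List Int)) (c : Nat) :
    ∀ k r, m.length - r ≤ k → r ≤ m.length →
      colZpre m c r + sufColZ m c r = colZpre m c m.length := by
  intro k
  induction k with
  | zero =>
    intro r h1 h2
    have hr : r = m.length := by omega
    rw [hr, sufColZ_stop m c m.length le_rfl, add_zero]
  | succ k ih =>
    intro r h1 h2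
    by_cases hlt : r < m.length
    · have hs : sufColZ m c r = (if pvIdx m r c = 0 then 1 else 0) + sufColZ m c (r+1) := by
        rw [sufColZ.eq_def, if_pos hlt]
      have hz := colZpre_succ m c r
      have hrec := ih (r+1) (by omega) (by omega)
      rw [hs]
      linarith
    · have hr : r = m.length := by omega
      rw [hr, sufColZ_stop m c m.length le_rfl, add_zero]

theorem rowZ_telescope (m : List (List Int)) (r : Nat) :
    ∀ k c, m.length - c ≤ k → c ≤ m.length →
      rowZpre m r c + sufRowZ m r c = rowZpre m r m.length := by
  intro k
  induction k with
  | zero =>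
    intro c h1 h2
    have hc : c = m.length := by omega
    rw [hc, sufRowZ_stop m r m.length le_rfl, add_zero]
  | succ k ih =>
    intro c h1 h2
    by_cases hlt : c < m.length
    · have hs : sufRowZ m r c = (if pvIdx m r c = 0 then 1 else 0) + sufRowZ m r (c+1) := by
        rw [sufRowZ.eq_def, if_pos hlt]
      have hz := rowZpre_succ m r c
      have hrec := ih (c+1) (by omega) (by omega)
      rw [hs]
      linarith
    · have hc : c = m.length := by omega
      rw [hc, sufRowZ_stop m r m.length le_rfl, add_zero]

theorem armDown_eq (m : List (List Int)) (r c : Nat) (hr : r ≤ m.length) :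
    armDown m r c = zbAlt m r c := by
  unfold armDown zbAlt
  rw [lastLe_eq_nextCol m c r hr]
  obtain ⟨a, b, _, _⟩ := nextColOne_spec m c (m.length - r) r (by omega) hr
  have t1 := colZ_telescope m c (m.length - r) r (by omega) hr
  have t2 := colZ_telescope m c (m.length - nextColOne m c r) (nextColOne m c r) (by omega) b
  linarith

theorem armRight_eq (m : List (List Int)) (r c : Nat) (hc : c ≤ m.length) :
    armRight m r c = zrAlt m r c := by
  unfold armRight zrAlt
  rw [lastLe_eq_nextRow m r c hc]
  obtain ⟨a, b, _, _⟩ := nextRowOne_spec m r (m.length - c) c (by omega) hc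
  have t1 := rowZ_telescope m r (m.length - c) c (by omega) hc
  have t2 := rowZ_telescope m r (m.length - nextRowOne m r c) (nextRowOne m r c) (by omega) b
  linarith

theorem pvArmOk_eq (m : List (List Int)) (L r c : Nat) (h1 : r + L ≤ m.length)
    (h2 : c + L ≤ m.length) : pvArmOk m L r c = pvCond m L r c := by
  unfold pvArmOk pvCond
  rw [armDown_eq m r c (by omega), armRight_eq m r c (by omega),
      armRight_eq m (r + L - 1) c (by omega), armDown_eq m r (c + L - 1) (by omega)]

theorem alt_eq (m : List (List Int)) : anyOld m = squareOfZeroes_alt m := by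
  rw [Bool.eq_iff_iff]
  simp only [anyOld, squareOfZeroes_alt, List.any_eq_true, List.mem_range, List.mem_range'_1]
  constructor
  · rintro ⟨L, ⟨hL2, hLn⟩, r, hr, c, hc, h⟩
    refine ⟨L, ⟨hL2, hLn⟩, r, hr, c, hc, ?_⟩
    rw [pvArmOk_eq m L r c (by omega) (by omega)]
    exact h
  · rintro ⟨L, ⟨hL2, hLn⟩, r, hr, c, hc, h⟩
    refine ⟨L, ⟨hL2, hLn⟩, r, hr, c, hc, ?_⟩
    rw [pvArmOk_eq m L r c (by omega) (by omega)] at h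
    exact h

-- ===== VERDICT (by name: the statement is the Claim_ definition above) =====
theorem squareOfZeroes_spec : Claim_equal_squareOfZeroes := by
  intro m _ _
  unfold Spec_squareOfZeroes
  rw [main_eq, alt_eq]
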